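-- pv_equiv track=rewrite | github.com/K00LDUD3/Math.exe-GUI | Special_Numbers.py | isNeon
-- ===== SOURCE A (Python) =====
-- def isNeon(num):
-- 	# sum of the digits of the square of the numbers is equal to the number itself
-- 	num_sqr = num**2
-- 	sum = 0
-- 	while num_sqr > 0:
-- 		sum += num_sqr % 10
-- 		num_sqr //= 10
-- 	if num == sum:
-- 		return 'Neon number'
-- 	return 'not Neon number'
-- ===== SOURCE B (Python) =====
-- def isNeon(num):
-- 	sq = num**2
-- 	s = sum(int(d) for d in str(sq))
-- 	return 'Neon number' if num == s else 'not Neon number'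
-- ===== Notes on version B (the rewrite author's own statement) =====
-- stated objective: idiomatic
-- what changed: Replaces the arithmetic digit-extraction while-loop (mod/floordiv by ten) with summing the digits of str(num**2) directly.
import Mathlib
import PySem

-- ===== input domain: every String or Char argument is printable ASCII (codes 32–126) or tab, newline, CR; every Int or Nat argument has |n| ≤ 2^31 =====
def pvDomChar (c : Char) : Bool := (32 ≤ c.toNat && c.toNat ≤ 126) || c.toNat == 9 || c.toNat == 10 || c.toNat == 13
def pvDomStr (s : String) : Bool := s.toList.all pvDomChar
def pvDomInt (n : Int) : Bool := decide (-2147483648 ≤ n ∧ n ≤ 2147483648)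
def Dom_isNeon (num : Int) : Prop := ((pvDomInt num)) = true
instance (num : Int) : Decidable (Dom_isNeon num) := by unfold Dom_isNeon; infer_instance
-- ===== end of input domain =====

-- B replaces A's arithmetic digit-extraction loop (mod/floordiv by ten) by summing the digits of str(num**2); same cost, more idiomatic.


-- ===== PORT A =====
-- the 'while num_sqr > 0' loop, carrying (num_sqr, sum)
def isNeonLoop (nsqr sum : Int) : Int :=
  if nsqr > 0 then
    isNeonLoop (PySem.Int.floordiv nsqr 10) (sum + PySem.Int.mod nsqr 10)
  else sum
termination_by nsqr.toNat
decreasing_by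
  simp only [PySem.Int.floordiv]
  rw [Int.fdiv_eq_ediv]
  simp
  omega

def isNeon (num : Int) : String :=
  let num_sqr := num ^ 2
  let sum := isNeonLoop num_sqr 0
  if num == sum then "Neon number" else "not Neon number"

-- ===== PORT B =====
-- int(d) on the single digit character d of str(sq) is its ASCII code minus 48 (exact: str of a nonnegative int is decimal digits)
def isNeon_alt (num : Int) : String :=
  let sq := num ^ 2
  let s := ((PySem.Int.toStr sq).toList.map (fun c => ((c.toNat : Int) - 48))).sum
  if num == s then "Neon number" else "not Neon number"

-- ===== PRECONDITION & SPEC =====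
def Spec_isNeon (num : Int) (out : String) : Prop := out = isNeon_alt num
instance (num : Int) (out : String) : Decidable (Spec_isNeon num out) := by unfold Spec_isNeon; infer_instance

-- ===== CLAIM (what is proved, stated in full; the proofs are below) =====
def Claim_equal_isNeon : Prop := ∀ (num : Int), Dom_isNeon num → Spec_isNeon num (isNeon num)

-- ===== LEMMAS AND PROOFS =====

-- digit sum of a Nat, LSB first (common reference for both ports)
def natDigitSum : Nat → Int
  | 0 => 0
  | n + 1 => (((n + 1) % 10 : Nat) : Int) + natDigitSum ((n + 1) / 10)
decreasing_by exact Nat.div_lt_self (Nat.succ_pos n) (by norm_num)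

theorem charval_digitChar : ∀ m : Nat, m < 10 → ((Nat.digitChar m).toNat : Int) - 48 = (m : Int) := by
  decide

theorem natDigitSum_eq (n : Nat) (h : 0 < n) :
    natDigitSum n = ((n % 10 : Nat) : Int) + natDigitSum (n / 10) := by
  cases n with
  | zero => omega
  | succ m => rw [natDigitSum]

-- A's loop computes sum + digit sum
theorem isNeonLoop_eq (k : Nat) : ∀ (n s : Int), 0 ≤ n → n.toNat ≤ k →
    isNeonLoop n s = s + natDigitSum n.toNat := by
  induction k with
  | zero =>
    intro n s hn hk
    rw [isNeonLoop]
    have : n = 0 := by omega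
    simp [this, natDigitSum]
  | succ k ih =>
    intro n s hn hk
    rw [isNeonLoop]
    by_cases h : n > 0
    · simp only [h, if_true]
      have hdiv : (PySem.Int.floordiv n 10).toNat = n.toNat / 10 := by
        simp only [PySem.Int.floordiv]
        rw [Int.fdiv_eq_ediv]; simp; omega
      have hdiv0 : 0 ≤ PySem.Int.floordiv n 10 := by
        simp only [PySem.Int.floordiv]
        rw [Int.fdiv_eq_ediv]; simp; positivity
      have hmod : PySem.Int.mod n 10 = ((n.toNat % 10 : Nat) : Int) := by
        simp only [PySem.Int.mod]
        rw [Int.fmod_eq_emod]; simp; omega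
      rw [ih _ _ hdiv0 (by rw [hdiv]; omega)]
      rw [natDigitSum_eq n.toNat (by omega), hdiv, hmod]
      ring
    · simp only [h, if_false]
      have : n = 0 := by omega
      simp [this, natDigitSum]

-- B's char sum over Nat.toDigitsCore
theorem toDigitsCore_sum (f : Nat) : ∀ (n : Nat) (ds : List Char), n < f →
    ((Nat.toDigitsCore 10 f n ds).map (fun c => ((c.toNat : Int) - 48))).sum
      = ((n % 10 : Nat) : Int) + natDigitSum (n / 10)
        + (ds.map (fun c => ((c.toNat : Int) - 48))).sum := by
  induction f with
  | zero => intro n ds h; omega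
  | succ f ih =>
    intro n ds h
    rw [Nat.toDigitsCore]
    by_cases h0 : n / 10 = 0
    · simp [h0, natDigitSum, charval_digitChar (n % 10) (Nat.mod_lt _ (by norm_num))]
    · simp only [h0, if_false]
      rw [ih (n / 10) _ (by
        have : n / 10 < n := Nat.div_lt_self (by omega) (by norm_num)
        omega)]
      simp [charval_digitChar (n % 10) (Nat.mod_lt _ (by norm_num))]
      rw [natDigitSum_eq (n / 10) (by omega)]
      push_cast
      ring

theorem toDigits_sum (n : Nat) :
    ((Nat.toDigits 10 n).map (fun c => ((c.toNat : Int) - 48))).sum = natDigitSum n := by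
  rw [Nat.toDigits, toDigitsCore_sum (n + 1) n [] (by omega)]
  cases n with
  | zero => simp [natDigitSum]
  | succ m => rw [natDigitSum]; simp

-- both ports compute the digit sum of num^2
theorem sums_agree (num : Int) :
    isNeonLoop (num ^ 2) 0
      = (((PySem.Int.toStr (num ^ 2)).toList.map (fun c => ((c.toNat : Int) - 48))).sum) := by
  have hsq : (0 : Int) ≤ num ^ 2 := sq_nonneg num
  rw [isNeonLoop_eq (num ^ 2).toNat _ 0 hsq le_rfl, zero_add]
  rw [PySem.Int.toList_toStr]
  simp only [PySem.Int.toChars, if_neg (by omega : ¬ num ^ 2 < 0)]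
  rw [toDigits_sum]

-- ===== VERDICT (by name: the statement is the Claim_ definition above) =====
theorem isNeon_spec : Claim_equal_isNeon := by
  intro num _
  unfold Spec_isNeon isNeon isNeon_alt
  simp only [sums_agree num]
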